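-- pv_equiv track=rewrite | github.com/marcosfede/algorithms | adventofcode/2019/d17/d17.py | arr_to_matrix
-- ===== SOURCE A (Python) =====
-- def arr_to_matrix(arr):
--     mat = []
--     row = []
--
--     for i, code in enumerate(arr):
--         if code == 10:
--             mat.append(row)
--             row = []
--         else:
--             row.append(chr(code))
--     # there is an extra newline at the end..
--     return mat[0:-1]
-- ===== SOURCE B (Python) =====
-- def arr_to_matrix(arr):
--     s = ''.join(chr(c) for c in arr)
--     return [list(line) for line in s.split('\n')[:-2]]
-- ===== Notes on version B (the rewrite author's own statement) =====
-- stated objective: idiomatic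
-- what changed: Replaced A's incremental row-accumulator loop (append chars, flush a row on each 10, then drop the last row) with a single join-then-split pipeline: build the whole string with ''.join(chr(c)...), split on '\n' and keep all but the last two segments.
-- outside the precondition, e.g. on arr_to_matrix([55296, 10]): A returns [], B returns []; on arr_to_matrix([-1]): A raises ValueError, B raises ValueError
import Mathlib
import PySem

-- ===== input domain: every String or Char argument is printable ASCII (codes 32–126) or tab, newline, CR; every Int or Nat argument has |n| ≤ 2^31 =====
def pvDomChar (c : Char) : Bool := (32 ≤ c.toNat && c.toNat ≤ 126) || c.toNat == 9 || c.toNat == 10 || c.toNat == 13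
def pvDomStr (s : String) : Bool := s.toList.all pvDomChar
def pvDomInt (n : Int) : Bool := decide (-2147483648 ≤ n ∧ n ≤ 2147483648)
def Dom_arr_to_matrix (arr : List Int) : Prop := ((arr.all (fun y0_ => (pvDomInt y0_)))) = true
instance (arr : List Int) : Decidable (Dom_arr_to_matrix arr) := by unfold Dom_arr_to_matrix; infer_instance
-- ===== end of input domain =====

-- B replaces A's incremental row-accumulator loop by an idiomatic join/split/slice pipeline
-- (same O(n) cost; the proof is about the return value only — neither version mutates its argument).

-- ===== PORT A =====
-- chr(code) is ported as Char.ofNat code.toNat, exact for the valid non-surrogate code points Pre_ admits.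
def arr_to_matrix (arr : List Int) : List (List String) :=
  let st := arr.foldl
    (fun (st : List (List String) × List String) code =>
      if code == 10 then (st.1 ++ [st.2], [])
      else (st.1, st.2 ++ [(Char.ofNat code.toNat).toString]))
    ([], [])
  PySem.List.slice st.1 (some 0) (some (-1))      -- mat[0:-1]

-- ===== PORT B =====
def arr_to_matrix_alt (arr : List Int) : List (List String) :=
  let s : List Char := arr.map (fun c => Char.ofNat c.toNat)   -- ''.join(chr(c) for c in arr), as code points
  let segs := PySem.Chars.splitOn s ['\n']                     -- s.split('\n')
  (PySem.List.slice segs none (some (-2))).map                 -- [:-2]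
    (fun line => line.map Char.toString)                       -- [list(line) for line in …]

-- ===== PRECONDITION & SPEC =====
-- Pre_ excludes codes outside chr's range (0..0x10FFFF), where both A and B raise ValueError, and
-- surrogate code points 0xD800–0xDFFF, where A returns a lone-surrogate Python str that has no
-- representation as a Lean String (B returns the same value there).
def Pre_arr_to_matrix (arr : List Int) : Prop :=
  ∀ c ∈ arr, 0 ≤ c ∧ c ≤ 1114111 ∧ ¬(55296 ≤ c ∧ c ≤ 57343)
instance (arr : List Int) : Decidable (Pre_arr_to_matrix arr) := by
  unfold Pre_arr_to_matrix; infer_instance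
def pvWitness_arr_to_matrix : List Int := [72, 105, 10, 10]
def Spec_arr_to_matrix (arr : List Int) (out : List (List String)) : Prop := out = arr_to_matrix_alt arr
instance (arr : List Int) (out : List (List String)) : Decidable (Spec_arr_to_matrix arr out) := by unfold Spec_arr_to_matrix; infer_instance

-- ===== CLAIM (what is proved, stated in full; the proofs are below) =====
def Claim_equal_arr_to_matrix : Prop := ∀ (arr : List Int), Dom_arr_to_matrix arr → Pre_arr_to_matrix arr → Spec_arr_to_matrix arr (arr_to_matrix arr)

-- ===== LEMMAS AND PROOFS =====

-- Reference splitter: pySplit pre l = the segments of (pre ++ l) split at '\n', where pre contains no '\n'.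
def pySplit (pre : List Char) : List Char → List (List Char)
  | [] => [pre]
  | c :: rest => if c = '\n' then pre :: pySplit [] rest else pySplit (pre ++ [c]) rest

theorem pySplit_ne_nil (pre : List Char) (l : List Char) : pySplit pre l ≠ [] := by
  induction l generalizing pre with
  | nil => simp [pySplit]
  | cons c rest ih => simp only [pySplit]; split <;> simp [ih]

theorem splitOn_go_eq (fuel : Nat) :
    ∀ (l cur : List Char) (acc : List (List Char)), l.length < fuel →
      PySem.Chars.splitOn.go ['\n'] fuel l cur acc = acc.reverse ++ pySplit cur.reverse l := by
  induction fuel with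
  | zero => intro l cur acc h; omega
  | succ n ih =>
    intro l cur acc h
    cases l with
    | nil => simp [PySem.Chars.splitOn.go, pySplit]
    | cons c rest =>
      simp only [PySem.Chars.splitOn.go]
      by_cases hc : c = '\n'
      · subst hc
        have hp : List.isPrefixOf ['\n'] ('\n' :: rest) = true := by
          simp [List.isPrefixOf]
        simp only [hp, if_pos]
        rw [ih _ [] (cur.reverse :: acc) (by simp at h ⊢; omega)]
        simp [pySplit]
      · have hp : List.isPrefixOf ['\n'] (c :: rest) = false := by
          have : ('\n' == c) = false := beq_false_of_ne (Ne.symm hc)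
          simp [List.isPrefixOf, this]
        simp only [hp, Bool.false_eq_true, if_neg, not_false_iff]
        rw [ih rest (c :: cur) acc (by simp at h ⊢; omega)]
        simp [pySplit, hc]

theorem splitOn_nl (s : List Char) : PySem.Chars.splitOn s ['\n'] = pySplit [] s := by
  unfold PySem.Chars.splitOn
  rw [splitOn_go_eq (s.length + 1) s [] [] (by omega)]
  simp

theorem clampIdx_neg (n : Nat) (i : Int) (hi : i < 0) (h : 0 ≤ (n : Int) + i) :
    PySem.List.clampIdx n i = ((n : Int) + i).toNat := by
  simp [PySem.List.clampIdx, hi, not_lt.mpr h]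

theorem clampIdx_zero (n : Nat) : PySem.List.clampIdx n 0 = 0 := by
  simp [PySem.List.clampIdx]

theorem slice_zero_neg_one {α : Type} (xs : List α) :
    PySem.List.slice xs (some 0) (some (-1)) = xs.dropLast := by
  cases xs with
  | nil => simp [PySem.List.slice, PySem.List.clampIdx]
  | cons x t =>
    have hc : PySem.List.clampIdx (x :: t).length (-1) = t.length := by
      rw [clampIdx_neg _ _ (by norm_num) (by simp)]
      simp
    simp only [PySem.List.slice, hc, clampIdx_zero]
    rw [List.dropLast_eq_take]
    simp

theorem slice_neg_two {α : Type} (xs : List α) :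
    PySem.List.slice xs none (some (-2)) = xs.dropLast.dropLast := by
  rcases xs with _ | ⟨x, _ | ⟨y, t⟩⟩
  · simp [PySem.List.slice, PySem.List.clampIdx]
  · simp [PySem.List.slice, PySem.List.clampIdx]
  · have hc : PySem.List.clampIdx (x :: y :: t).length (-2) = t.length := by
      rw [clampIdx_neg _ _ (by norm_num) (by simp; omega)]
      simp
      omega
    simp only [PySem.List.slice, hc]
    rw [List.dropLast_eq_take, List.dropLast_eq_take, List.take_take]
    simp

-- under Pre_, chr(10) = '\n' and chr(c) ≠ '\n' for c ≠ 10
theorem chr_eq_nl_iff (c : Int) (h0 : 0 ≤ c) (h1 : c ≤ 1114111)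
    (h2 : ¬(55296 ≤ c ∧ c ≤ 57343)) : (Char.ofNat c.toNat = '\n') ↔ c = 10 := by
  constructor
  · intro he
    have hv : c.toNat.isValidChar := by
      unfold Nat.isValidChar
      omega
    have := Char.toNat_ofNat c.toNat
    rw [if_pos hv] at this
    have h10 : c.toNat = 10 := by rw [← this, he]; rfl
    omega
  · intro he; subst he; rfl

-- A's loop, with the row accumulator exposed as a list of code points
theorem foldA_eq (arr : List Int) :
    ∀ (mat : List (List String)) (rowc : List Char), Pre_arr_to_matrix arr →
      (arr.foldl
        (fun (st : List (List String) × List String) code =>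
          if code == 10 then (st.1 ++ [st.2], [])
          else (st.1, st.2 ++ [(Char.ofNat code.toNat).toString]))
        (mat, rowc.map Char.toString)).1
      = mat ++ ((pySplit rowc (arr.map (fun c => Char.ofNat c.toNat))).dropLast).map
          (fun seg => seg.map Char.toString) := by
  induction arr with
  | nil => intro mat rowc _; simp [pySplit]
  | cons c rest ih =>
    intro mat rowc hpre
    obtain ⟨h0, h1, h2⟩ := hpre c (List.mem_cons_self ..)
    have hpre' : Pre_arr_to_matrix rest := fun x hx => hpre x (List.mem_cons_of_mem _ hx)
    by_cases hc : c = 10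
    · subst hc
      simp only [List.foldl_cons, beq_self_eq_true, if_pos, List.map_cons]
      have : (mat ++ [rowc.map Char.toString], ([] : List String))
           = (mat ++ [rowc.map Char.toString], (([] : List Char)).map Char.toString) := by simp
      rw [this, ih (mat ++ [rowc.map Char.toString]) [] hpre']
      have hnl : Char.ofNat (10 : Int).toNat = '\n' := rfl
      rw [hnl]
      rw [show pySplit rowc ('\n' :: List.map (fun c => Char.ofNat c.toNat) rest)
            = rowc :: pySplit [] (List.map (fun c => Char.ofNat c.toNat) rest) from by
          simp [pySplit]]
      rw [List.dropLast_cons_of_ne_nil (pySplit_ne_nil _ _)]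
      simp
    · have hb : (c == (10 : Int)) = false := by simp [hc]
      simp only [List.foldl_cons, hb, Bool.false_eq_true, if_neg, not_false_iff, List.map_cons]
      have : rowc.map Char.toString ++ [(Char.ofNat c.toNat).toString]
           = (rowc ++ [Char.ofNat c.toNat]).map Char.toString := by simp
      rw [this, ih mat (rowc ++ [Char.ofNat c.toNat]) hpre']
      have hne : ¬ (Char.ofNat c.toNat = '\n') := by
        rw [chr_eq_nl_iff c h0 h1 h2]; exact hc
      simp only [pySplit, if_neg hne]

-- ===== VERDICT (by name: the statement is the Claim_ definition above) =====
theorem arr_to_matrix_spec : Claim_equal_arr_to_matrix := by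
  intro arr _ hpre
  unfold Spec_arr_to_matrix arr_to_matrix arr_to_matrix_alt
  simp only []
  have h := foldA_eq arr [] [] hpre
  simp only [List.map_nil] at h
  rw [h, splitOn_nl, slice_zero_neg_one, slice_neg_two]
  simp only [List.nil_append, ← List.map_dropLast]
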